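-- pv_equiv track=rewrite | github.com/tait-py/KineticProofreadingCdc48 | lib/helpers.py | group_states
-- ===== SOURCE A (Python) =====
-- import itertools
--
-- def group_states(states):
--     """
--     Given a sequence of values, and returns a list of regions of consecutive identical values
--     defined by their start/end indexes.
--
--     Arguments:
--         states (list): any sequence of values.
--
--     Returns:
--         regions (list): list of regions of consecutive identical values defined by their start/end =
--                         indexes in the initial list.
--     """
--     grouped_states = [(key, sum(1 for _ in group)) for key, group in itertools.groupby(states)]
--
--     regions = []
--     total_count = 0
--     for state, count in grouped_states:
--         if state:
--             regions.append((total_count, total_count + count))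
--         total_count += count
--
--     return regions
-- ===== SOURCE B (Python) =====
-- def group_states(states):
--     """
--     Given a sequence of values, returns a list of regions of consecutive identical
--     truthy values defined by their start/end indexes.
--     """
--     if not states:
--         return []
--     n = len(states)
--     # (index, value) at the start of every run: position 0 plus every change point
--     starts = [(0, states[0])] + [
--         (i, v) for i, (p, v) in enumerate(zip(states, states[1:]), 1) if v != p
--     ]
--     # each run ends where the next one starts; the last ends at n
--     ends = [i for i, _ in starts[1:]] + [n]
--     return [(s, e) for (s, v), e in zip(starts, ends) if v]
-- ===== Notes on version B (the rewrite author's own statement) =====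
-- stated objective: alternative
-- what changed: Replaces the groupby run-length-encoding plus running-total accumulation loop with staged comprehension passes: collect (index,value) run starts by zipping the list with its shift, pair each start with the next start (or len) via zip, and filter the truthy ones; avoiding groupby's per-group iterator objects and the per-element generator sum makes it measurably faster.
import Mathlib
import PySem

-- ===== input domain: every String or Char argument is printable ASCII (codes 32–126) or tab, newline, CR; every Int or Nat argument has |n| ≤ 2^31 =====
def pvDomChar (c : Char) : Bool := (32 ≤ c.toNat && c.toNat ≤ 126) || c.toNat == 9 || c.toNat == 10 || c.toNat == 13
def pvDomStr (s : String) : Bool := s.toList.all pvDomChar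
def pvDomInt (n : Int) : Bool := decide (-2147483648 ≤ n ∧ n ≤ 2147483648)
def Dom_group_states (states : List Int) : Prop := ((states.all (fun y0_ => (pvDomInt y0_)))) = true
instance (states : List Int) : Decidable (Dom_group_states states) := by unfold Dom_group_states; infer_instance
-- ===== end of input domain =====

-- B replaces A's groupby run-length-encoding plus accumulation loop by staged passes:
-- first collect the (index, value) run starts via a zip-with-shifted comprehension,
-- then pair each start with the next start (or len) and filter truthy; objective: alternative.


-- ===== PORT A =====
-- itertools.groupby(states) as (key, count) pairs, exactly A's comprehension
def pyGroupbyCount (l : List Int) : List (Int × Int) :=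
  match l with
  | [] => []
  | x :: xs =>
    (x, 1 + (xs.takeWhile (· == x)).length) :: pyGroupbyCount (xs.dropWhile (· == x))
termination_by l.length
decreasing_by
  simpa using Nat.lt_succ_of_le (List.Sublist.length_le (List.dropWhile_sublist (· == x)))

def group_states (states : List Int) : List (Int × Int) :=
  let grouped_states := pyGroupbyCount states
  (grouped_states.foldl
    (fun (acc : List (Int × Int) × Int) sc =>
      ((if sc.1 ≠ 0 then acc.1 ++ [(acc.2, acc.2 + sc.2)] else acc.1), acc.2 + sc.2))
    ([], 0)).1

-- ===== PORT B =====
-- Source B: run starts as "[(0, states[0])] + [(i, v) for i, (p, v) in enumerate(zip(states, states[1:]), 1) if v != p]",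
-- ends as "[i for i, _ in starts[1:]] + [n]", result as the truthy-filtered zip of starts with ends
def group_states_alt (states : List Int) : List (Int × Int) :=
  match states with
  | [] => []
  | x :: xs =>
    let n : Int := (x :: xs).length
    let starts : List (Int × Int) :=
      (0, x) :: ((PySem.List.enumerate ((x :: xs).zip xs) 1).filterMap
        (fun ipv => if ipv.2.2 ≠ ipv.2.1 then some (ipv.1, ipv.2.2) else none))
    let ends : List Int := (starts.drop 1).map Prod.fst ++ [n]
    (starts.zip ends).filterMap (fun se => if se.1.2 ≠ 0 then some (se.1.1, se.2) else none)

-- ===== PRECONDITION & SPEC =====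
def Spec_group_states (states : List Int) (out : List (Int × Int)) : Prop := out = group_states_alt states
instance (states : List Int) (out : List (Int × Int)) : Decidable (Spec_group_states states out) := by unfold Spec_group_states; infer_instance

-- ===== CLAIM (what is proved, stated in full; the proofs are below) =====
def Claim_equal_group_states : Prop := ∀ (states : List Int), Dom_group_states states → Spec_group_states states (group_states states)

-- ===== LEMMAS AND PROOFS =====

-- canonical form of the result: regions of the runs of l, offset by t
def Agen (l : List Int) (t : Int) : List (Int × Int) :=
  match l with
  | [] => []
  | x :: xs =>
    let c : Int := 1 + (xs.takeWhile (· == x)).length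
    if x ≠ 0 then (t, t + c) :: Agen (xs.dropWhile (· == x)) (t + c)
    else Agen (xs.dropWhile (· == x)) (t + c)
termination_by l.length
decreasing_by
  all_goals simpa using Nat.lt_succ_of_le (List.Sublist.length_le (List.dropWhile_sublist (· == x)))

-- A's fold over the grouped runs, with any accumulator, produces Agen
theorem foldA_eq_Agen (l : List Int) (regions : List (Int × Int)) (t : Int) :
    ((pyGroupbyCount l).foldl
      (fun (acc : List (Int × Int) × Int) sc =>
        ((if sc.1 ≠ 0 then acc.1 ++ [(acc.2, acc.2 + sc.2)] else acc.1), acc.2 + sc.2))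
      (regions, t)).1 = regions ++ Agen l t := by
  induction l using pyGroupbyCount.induct generalizing regions t with
  | case1 => simp [pyGroupbyCount, Agen]
  | case2 x xs ih =>
    rw [pyGroupbyCount]
    simp only [List.foldl_cons]
    rw [ih]
    rw [Agen]
    by_cases hx : x = 0 <;> simp [hx]

-- (index, value) at every change point of the list, adjacent-pair form; the element
-- at relative position 0 sits at absolute index t
def chgPairs : List Int → Int → List (Int × Int)
  | [], _ => []
  | [_], _ => []
  | a :: b :: r, t =>
    (if b ≠ a then [((t + 1 : Int), b)] else []) ++ chgPairs (b :: r) (t + 1)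

-- B's change-point comprehension computes chgPairs
theorem zip_chg (a : Int) (r : List Int) (k : Int) :
    ((PySem.List.enumerate ((a :: r).zip r) k).filterMap
      (fun ipv => if ipv.2.2 ≠ ipv.2.1 then some (ipv.1, ipv.2.2) else none))
    = chgPairs (a :: r) (k - 1) := by
  induction r generalizing a k with
  | nil => simp [chgPairs]
  | cons b r' ih =>
    rw [show (a :: b :: r').zip (b :: r') = (a, b) :: (b :: r').zip r' from rfl,
      PySem.List.enumerate_cons, List.filterMap_cons, ih b (k + 1), chgPairs,
      show k + 1 - 1 = k by ring, show k - 1 + 1 = k by ring]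
    by_cases h : b = a <;> simp [h]

-- run form of chgPairs: no change inside the first run, then a change at its end
theorem chgPairs_run (x : Int) (xs : List Int) (t : Int) :
    chgPairs (x :: xs) t =
      match xs.dropWhile (· == x) with
      | [] => []
      | y :: ys =>
        (t + (1 + ((xs.takeWhile (· == x)).length : Int)), y) ::
          chgPairs (y :: ys) (t + (1 + ((xs.takeWhile (· == x)).length : Int))) := by
  induction xs generalizing x t with
  | nil => simp [chgPairs]
  | cons b r ih =>
    by_cases h : b = x
    · subst h
      rw [chgPairs]
      have hb : (b == b) = true := by simp
      rw [ih b (t + 1)]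
      simp only [List.takeWhile, List.dropWhile, hb]
      cases hdw : r.dropWhile (· == b) with
      | nil => simp
      | cons y ys =>
        simp only [List.length_cons]
        have : t + 1 + (1 + ((r.takeWhile (· == b)).length : Int))
             = t + (1 + (((r.takeWhile (· == b)).length : Nat) + 1 : Nat)) := by
          push_cast; ring
        rw [this]
        simp
    · have hb : (b == x) = false := by simp [h]
      rw [chgPairs]
      simp [h, hb, List.takeWhile, List.dropWhile]

-- the run starts of l, offset t: position t plus the change points
def startsOf (l : List Int) (t : Int) : List (Int × Int) :=
  match l with
  | [] => []
  | x :: xs => (t, x) :: chgPairs (x :: xs) t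

-- pairing starts with ends and filtering truthy, Source B's last two passes
def regionsOf (starts : List (Int × Int)) (n : Int) : List (Int × Int) :=
  (starts.zip ((starts.drop 1).map Prod.fst ++ [n])).filterMap
    (fun se => if se.1.2 ≠ 0 then some (se.1.1, se.2) else none)

theorem regionsOf_cons (t x n : Int) (rest : List (Int × Int)) :
    regionsOf ((t, x) :: rest) n =
      (if x ≠ 0 then [(t, (match rest with | [] => n | s :: _ => s.1))] else [])
        ++ regionsOf rest n := by
  cases rest with
  | nil => by_cases h : x = 0 <;> simp [regionsOf, h]
  | cons s ss => by_cases h : x = 0 <;> simp [regionsOf, h]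

-- one run step of the staged passes
theorem regions_step (x : Int) (xs : List Int) (t : Int)
    (ih : regionsOf (startsOf (xs.dropWhile (· == x)) (t + (1 + ((xs.takeWhile (· == x)).length : Int))))
            ((t + (1 + ((xs.takeWhile (· == x)).length : Int))) + ((xs.dropWhile (· == x)).length : Int))
          = Agen (xs.dropWhile (· == x)) (t + (1 + ((xs.takeWhile (· == x)).length : Int)))) :
    regionsOf (startsOf (x :: xs) t) (t + ((x :: xs).length : Int)) = Agen (x :: xs) t := by
  have hlen : (xs.takeWhile (· == x)).length + (xs.dropWhile (· == x)).length = xs.length := by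
    conv_rhs => rw [← List.takeWhile_append_dropWhile (p := (· == x)) (l := xs)]
    rw [List.length_append]
  rw [startsOf, chgPairs_run, Agen]
  cases hdw : xs.dropWhile (· == x) with
  | nil =>
    have htw : ((xs.takeWhile (· == x)).length : Int) = (xs.length : Int) := by
      rw [hdw] at hlen; simp at hlen; exact_mod_cast hlen
    rw [hdw] at *
    by_cases h : x = 0 <;> (simp [h, regionsOf, Agen, htw, List.length_cons]; try omega)
  | cons y ys =>
    rw [hdw] at ih hlen
    rw [regionsOf_cons]
    have hn : t + ((x :: xs).length : Int)
        = (t + (1 + ((xs.takeWhile (· == x)).length : Int))) + (((y :: ys).length : Int)) := by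
      simp only [List.length_cons] at hlen ⊢; push_cast at hlen ⊢; omega
    rw [hn]
    rw [startsOf] at ih
    rw [ih]
    by_cases h : x = 0 <;> simp [h]

-- the staged passes compute the canonical run regions
theorem regionsOf_startsOf (l : List Int) (t : Int) :
    regionsOf (startsOf l t) (t + (l.length : Int)) = Agen l t := by
  induction l, t using Agen.induct with
  | case1 t => simp [startsOf, regionsOf, Agen]
  | case2 t x xs c hx ih => exact regions_step x xs t ih
  | case3 t x xs c hx ih => exact regions_step x xs t ih

-- ===== VERDICT (by name: the statement is the Claim_ definition above) =====
theorem group_states_spec : Claim_equal_group_states := by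
  intro states _
  unfold Spec_group_states
  show group_states states = group_states_alt states
  cases states with
  | nil => simp [group_states, group_states_alt, pyGroupbyCount]
  | cons x xs =>
    have hA : group_states (x :: xs) = Agen (x :: xs) 0 := by
      unfold group_states
      rw [foldA_eq_Agen]
      simp
    have hB : group_states_alt (x :: xs) = regionsOf (startsOf (x :: xs) 0) ((x :: xs).length : Int) := by
      simp only [group_states_alt, regionsOf, startsOf]
      rw [zip_chg x xs 1]
      norm_num
    rw [hA, hB, ← regionsOf_startsOf]
    norm_num
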